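-- pv_equiv track=rewrite | github.com/fduda/Intro_prog | Semana 3/ex3/ex3.py | equal_product_pairs
-- ===== SOURCE A (Python) =====
-- def equal_product_pairs(n):
--     """""
--     This function receives an integer and returns all the pairs of integers
--     that results in n when multiplied.
--     """""
--     # Generates a list from 2 to n.
--     numbers_list = list(range(2, n + 1))
--     intermediate_list = []
--     final_result_list = []
--     # The following loop scans through numbers_list and checks if two
--     # numbers gets n as a multiplication. If so, adds the pair to intermediate
--     # list.
--     for first_number in numbers_list:
--         for second_number in numbers_list:
--             if first_number * second_number == n:
--                 pair = [[first_number, second_number]]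
--                 intermediate_list.extend(pair)
--     # The next block appends all the pairs, without repetition,
--     # to the final list.
--     if len(intermediate_list) % 2 == 0:
--         final_result_list = intermediate_list[0:int(len(intermediate_list) / 2)]
--     elif len(intermediate_list) % 2 != 0:
--         final_result_list = \
--             intermediate_list[0:int(len(intermediate_list) // 2 + 1)]
--
--     return final_result_list
-- ===== SOURCE B (Python) =====
-- def equal_product_pairs(n):
--     """Return the pairs [a, b] with 2 <= a <= b, a * b == n, in ascending a.
--
--     Trial division up to the square root instead of A's quadratic double scan
--     over range(2, n + 1) followed by taking the first half of the pair list.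
--     """
--     result = []
--     a = 2
--     while a * a <= n:
--         if n % a == 0:
--             result.append([a, n // a])
--         a += 1
--     return result
-- ===== Notes on version B (the rewrite author's own statement) =====
-- stated objective: faster
-- what changed: Replaces A's O(n^2) double scan over range(2, n+1) followed by taking the first half of the pair list with trial division: a single loop over a while a*a <= n emitting [a, n//a] for each divisor.
import Mathlib
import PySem

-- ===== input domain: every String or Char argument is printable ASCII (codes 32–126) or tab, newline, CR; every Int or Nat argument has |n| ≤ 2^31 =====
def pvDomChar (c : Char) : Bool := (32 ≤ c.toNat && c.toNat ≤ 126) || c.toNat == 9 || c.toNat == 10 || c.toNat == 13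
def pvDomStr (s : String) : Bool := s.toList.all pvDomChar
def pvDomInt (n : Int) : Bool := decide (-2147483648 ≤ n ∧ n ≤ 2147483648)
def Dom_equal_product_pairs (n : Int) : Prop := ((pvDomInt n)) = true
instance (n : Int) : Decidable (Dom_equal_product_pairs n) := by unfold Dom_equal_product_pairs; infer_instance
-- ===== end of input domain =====

-- B replaces A's quadratic double scan plus take-first-half with trial division up to the
-- square root (objective: faster); both programs are pure, the return value is compared.

-- ===== PORT A =====
def equal_product_pairs (n : Int) : List (List Int) :=
  -- numbers_list = list(range(2, n + 1))
  let numbersList := PySem.List.pyRange 2 (n + 1) 1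
  -- nested for-loops: if first * second == n, extend intermediate_list with the pair
  let intermediateList := numbersList.foldl (fun acc firstNumber =>
    numbersList.foldl (fun acc2 secondNumber =>
      if firstNumber * secondNumber = n then acc2 ++ [[firstNumber, secondNumber]] else acc2) acc) []
  -- int(len(l)/2) on a list length is exactly len(l) // 2: the length is nonneg and far
  -- below 2^53, so Python's float division is exact and int() truncates to the floor
  if intermediateList.length % 2 = 0 then
    PySem.List.slice intermediateList (some 0) (some (PySem.Int.floordiv (intermediateList.length : Int) 2))
  else
    PySem.List.slice intermediateList (some 0) (some (PySem.Int.floordiv (intermediateList.length : Int) 2 + 1))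

-- ===== PORT B =====
-- Source B's 'while a * a <= n' loop, as structural recursion on an explicit iteration bound:
-- n.toNat bounds the number of iterations (the loop stops once a > n, see eppAltLoop_eq)
def eppAltLoop (n : Int) (fuel : Nat) (a : Int) (result : List (List Int)) : List (List Int) :=
  match fuel with
  | 0 => result
  | fuel + 1 =>
    if a * a ≤ n then
      eppAltLoop n fuel (a + 1)
        (result ++ (if PySem.Int.mod n a = 0 then [[a, PySem.Int.floordiv n a]] else []))
    else result

def equal_product_pairs_alt (n : Int) : List (List Int) :=
  eppAltLoop n n.toNat 2 []

-- ===== PRECONDITION & SPEC =====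
def Spec_equal_product_pairs (n : Int) (out : List (List Int)) : Prop := out = equal_product_pairs_alt n
instance (n : Int) (out : List (List Int)) : Decidable (Spec_equal_product_pairs n out) := by unfold Spec_equal_product_pairs; infer_instance

-- ===== CLAIM (what is proved, stated in full; the proofs are below) =====
def Claim_equal_equal_product_pairs : Prop := ∀ (n : Int), Dom_equal_product_pairs n → Spec_equal_product_pairs n (equal_product_pairs n)

-- ===== LEMMAS AND PROOFS =====

-- the ascending list of divisors a of n with 2 ≤ a and 2 ≤ n/a
-- (the first components of A's intermediate pair list)
def eppD (n : Int) : List Int :=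
  (PySem.List.pyRange 2 (n + 1) 1).filter (fun a => decide (a ∣ n) && decide (2 ≤ n / a))

-- B's divisor list from a upward: divisors not exceeding the square root
def eppB (n : Int) (a : Int) : List Int :=
  (PySem.List.pyRange a (n + 1) 1).filter (fun d => decide (d ∣ n) && decide (d * d ≤ n))

-- generic: filtering by a predicate with at most one (known) solution
lemma filter_eq_singleton_of_unique {l : List Int} (hl : l.Nodup) (p : Int → Bool) (c : Int)
    (h : ∀ x, p x = true → x = c) :
    l.filter p = if c ∈ l ∧ p c = true then [c] else [] := by
  induction l with
  | nil => simp
  | cons x t ih =>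
    rcases List.nodup_cons.mp hl with ⟨hxt, hnt⟩
    by_cases hx : p x = true
    · have hxc : x = c := h x hx
      subst hxc
      have hft : t.filter p = [] := by
        apply List.filter_eq_nil_iff.mpr
        intro y hy hpy
        exact hxt ((h y hpy) ▸ hy)
      simp [hx, hft, List.mem_cons]
    · have hcx : ¬ (c = x ∧ p c = true) := by
        rintro ⟨rfl, hpc⟩; exact hx hpc
      rw [List.filter_cons_of_neg (by simpa using hx), ih hnt]
      by_cases hc : c ∈ t ∧ p c = true
      · simp [hc, List.mem_cons]
      · simp only [List.mem_cons]
        rw [if_neg hc, if_neg]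
        rintro ⟨hc1 | hc2, hpc⟩
        · exact hcx ⟨hc1, hpc⟩
        · exact hc ⟨hc2, hpc⟩

-- generic: flatMap whose pieces are empty or singleton is a filter-map
lemma flatMap_eq_filter_map {α β : Type} (l : List α) (g : α → List β) (p : α → Bool) (f : α → β)
    (h : ∀ a ∈ l, g a = if p a then [f a] else []) : l.flatMap g = (l.filter p).map f := by
  induction l with
  | nil => simp
  | cons x t ih =>
    rw [List.flatMap_cons, h x List.mem_cons_self, ih (fun a ha => h a (List.mem_cons_of_mem _ ha))]
    by_cases hx : p x = true
    · simp [hx]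
    · simp [hx]

-- generic: on a strictly ascending list, a downward-closed predicate selects a prefix
lemma filter_eq_take_countP (l : List Int) (p : Int → Bool) (hl : l.Pairwise (· < ·))
    (hp : ∀ x ∈ l, ∀ y ∈ l, x < y → p y = true → p x = true) :
    l.filter p = l.take (l.countP p) := by
  induction l with
  | nil => simp
  | cons x t ih =>
    rcases List.pairwise_cons.mp hl with ⟨hxt, hpt⟩
    by_cases hx : p x = true
    · rw [List.filter_cons_of_pos hx]
      have hc1 : (x :: t).countP p = t.countP p + 1 := by simp [hx]
      rw [hc1, List.take_succ_cons]
      rw [ih hpt (fun a ha b hb hab hpb => hp a (List.mem_cons_of_mem _ ha) b (List.mem_cons_of_mem _ hb) hab hpb)]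
    · have ht : ∀ y ∈ t, ¬ p y = true := by
        intro y hy hpy
        exact hx (hp x List.mem_cons_self y (List.mem_cons_of_mem _ hy) (hxt y hy) hpy)
      have hft : t.filter p = [] := List.filter_eq_nil_iff.mpr ht
      have hct : t.countP p = 0 := List.countP_eq_zero.mpr ht
      simp [hx, hft, hct]

-- generic: counting ≤ and ≥ double-counts exactly the = elements
lemma countP_le_add_countP_ge (l : List Int) (f : Int → Int) (c : Int) :
    l.countP (fun x => decide (f x ≤ c)) + l.countP (fun x => decide (c ≤ f x))
      = l.length + l.countP (fun x => decide (f x = c)) := by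
  induction l with
  | nil => simp
  | cons x t ih =>
    simp only [List.countP_cons, List.length_cons]
    rcases lt_trichotomy (f x) c with h | h | h
    · simp [le_of_lt h, not_le.mpr h, ne_of_lt h]; omega
    · simp [h]; omega
    · simp [le_of_lt h, not_le.mpr h, (ne_of_lt h).symm]; omega

-- generic: a predicate with at most one solution among the members of a Nodup list
lemma countP_le_one (l : List Int) (p : Int → Bool) (hl : l.Nodup)
    (h : ∀ x ∈ l, ∀ y ∈ l, p x = true → p y = true → x = y) : l.countP p ≤ 1 := by
  induction l with
  | nil => simp
  | cons x t ih =>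
    rcases List.nodup_cons.mp hl with ⟨hxt, hnt⟩
    by_cases hx : p x = true
    · have hct : t.countP p = 0 := by
        apply List.countP_eq_zero.mpr
        intro y hy hpy
        exact hxt ((h x List.mem_cons_self y (List.mem_cons_of_mem _ hy) hx hpy) ▸ hy)
      simp [hx, hct]
    · have := ih hnt (fun a ha b hb => h a (List.mem_cons_of_mem _ ha) b (List.mem_cons_of_mem _ hb))
      simp [hx]; omega

lemma mem_eppD {n a : Int} : a ∈ eppD n ↔ (2 ≤ a ∧ a ≤ n) ∧ a ∣ n ∧ 2 ≤ n / a := by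
  simp [eppD, List.mem_filter, PySem.List.mem_pyRange_one]

lemma eppD_mul {n a : Int} (h : a ∈ eppD n) : a * (n / a) = n := by
  rcases mem_eppD.mp h with ⟨⟨h2, _⟩, hdvd, _⟩
  exact Int.mul_ediv_cancel' hdvd

lemma eppD_closure {n a : Int} (h : a ∈ eppD n) : (n / a) ∈ eppD n ∧ n / (n / a) = a := by
  rcases mem_eppD.mp h with ⟨⟨h2, hn⟩, hdvd, hb2⟩
  have hab : a * (n / a) = n := Int.mul_ediv_cancel' hdvd
  set b := n / a with hbdef
  have hcancel : n / b = a := by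
    rw [← hab]; exact Int.mul_ediv_cancel a (by omega : b ≠ 0)
  refine ⟨mem_eppD.mpr ⟨⟨hb2, ?_⟩, ⟨a, by rw [← hab]; ring⟩, by omega⟩, hcancel⟩
  nlinarith

lemma eppD_pairwise (n : Int) : (eppD n).Pairwise (· < ·) :=
  (PySem.List.pairwise_lt_pyRange_one 2 (n + 1)).filter _

lemma eppD_nodup (n : Int) : (eppD n).Nodup :=
  (eppD_pairwise n).imp (fun h => ne_of_lt h)

lemma eppD_anti {n a b : Int} (ha : a ∈ eppD n) (hb : b ∈ eppD n) (h : a < b) : n / b < n / a := by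
  have h1 := eppD_mul ha
  have h2 := eppD_mul hb
  rcases mem_eppD.mp ha with ⟨⟨ha2, _⟩, _, ha2'⟩
  rcases mem_eppD.mp hb with ⟨⟨hb2, _⟩, _, hb2'⟩
  nlinarith

lemma eppD_sq_iff {n d : Int} (hd : d ∈ eppD n) : n ≤ (n / d) * (n / d) ↔ d * d ≤ n := by
  have h1 := eppD_mul hd
  rcases mem_eppD.mp hd with ⟨⟨hd2, _⟩, _, hb2⟩
  constructor <;> intro h <;> nlinarith

-- the cofactor map reverses the divisor list
lemma eppD_map_div_eq_reverse (n : Int) :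
    (eppD n).map (fun d => n / d) = (eppD n).reverse := by
  have hmem : ∀ x, x ∈ (eppD n).map (fun d => n / d) ↔ x ∈ eppD n := by
    intro x
    simp only [List.mem_map]
    constructor
    · rintro ⟨d, hd, rfl⟩; exact (eppD_closure hd).1
    · intro hx
      exact ⟨n / x, (eppD_closure hx).1, (eppD_closure hx).2⟩
  have hnodup : ((eppD n).map (fun d => n / d)).Nodup := by
    apply (eppD_nodup n).map_on
    intro a ha b hb hab
    rw [← (eppD_closure ha).2, hab, (eppD_closure hb).2]
  have hperm : ((eppD n).map (fun d => n / d)).Perm (eppD n).reverse := by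
    apply (List.perm_ext_iff_of_nodup hnodup (List.nodup_reverse.mpr (eppD_nodup n))).mpr
    intro x
    rw [hmem, List.mem_reverse]
  have hpair : ((eppD n).map (fun d => n / d)).Pairwise (fun x y => y < x) := by
    rw [List.pairwise_map]
    exact (eppD_pairwise n).imp_of_mem (fun {a b} ha hb h => eppD_anti ha hb h)
  have hpair2 : ((eppD n).reverse).Pairwise (fun x y => y < x) := by
    rw [List.pairwise_reverse]
    exact eppD_pairwise n
  exact List.Perm.eq_of_pairwise
    (fun a b _ _ h1 h2 => absurd h2 (not_lt.mpr (le_of_lt h1))) hpair hpair2 hperm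

-- divisors up to the square root are half of all of them, the exact square counted once
lemma eppD_countP_sq (n : Int) :
    2 * (eppD n).countP (fun d => decide (d * d ≤ n))
      = (eppD n).length + (eppD n).countP (fun d => decide (d * d = n)) := by
  have hge : (eppD n).countP (fun d => decide (n ≤ d * d))
      = (eppD n).countP (fun d => decide (d * d ≤ n)) := by
    calc (eppD n).countP (fun d => decide (n ≤ d * d))
        = ((eppD n).reverse).countP (fun d => decide (n ≤ d * d)) := (List.countP_reverse).symm
      _ = ((eppD n).map (fun d => n / d)).countP (fun d => decide (n ≤ d * d)) := by
            rw [eppD_map_div_eq_reverse]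
      _ = (eppD n).countP (fun d => decide (n ≤ (n / d) * (n / d))) := List.countP_map
      _ = (eppD n).countP (fun d => decide (d * d ≤ n)) := by
            rw [List.countP_eq_length_filter, List.countP_eq_length_filter]
            congr 1
            apply List.filter_congr
            intro d hd
            simp only [decide_eq_decide]
            exact eppD_sq_iff hd
  have := countP_le_add_countP_ge (eppD n) (fun d => d * d) n
  simp only at this
  omega

lemma eppD_countP_eq_le_one (n : Int) : (eppD n).countP (fun d => decide (d * d = n)) ≤ 1 := by
  apply countP_le_one _ _ (eppD_nodup n)
  intro x hx y hy hpx hpy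
  rcases mem_eppD.mp hx with ⟨⟨hx2, _⟩, _, _⟩
  rcases mem_eppD.mp hy with ⟨⟨hy2, _⟩, _, _⟩
  have hpx' : x * x = n := by simpa using hpx
  have hpy' : y * y = n := by simpa using hpy
  nlinarith

-- A's intermediate list is the divisor list paired with cofactors
lemma epp_intermediate (n : Int) :
    (PySem.List.pyRange 2 (n + 1) 1).foldl (fun acc a =>
      (PySem.List.pyRange 2 (n + 1) 1).foldl (fun acc2 b =>
        if a * b = n then acc2 ++ [[a, b]] else acc2) acc) []
    = (eppD n).map (fun d => [d, n / d]) := by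
  set L := PySem.List.pyRange 2 (n + 1) 1 with hL
  rw [PySem.List.foldl_congr_mem' L _
    (fun acc a => acc ++ (L.filter (fun b => decide (a * b = n))).map (fun b => [a, b])) []
    (fun a _ acc => PySem.List.foldl_append_ite (fun b => a * b = n) (fun b => [a, b]) L acc)]
  rw [PySem.List.foldl_append_eq_flatMap]
  rw [flatMap_eq_filter_map L _ (fun a => decide (a ∣ n) && decide (2 ≤ n / a)) (fun d => [d, n / d]) ?_]
  · rfl
  intro a haL
  have ha2 : 2 ≤ a ∧ a < n + 1 := (PySem.List.mem_pyRange_one).mp haL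
  have hfil : L.filter (fun b => decide (a * b = n))
      = if (n / a) ∈ L ∧ a * (n / a) = n then [n / a] else [] := by
    have := filter_eq_singleton_of_unique (l := L) (hL ▸ PySem.List.nodup_pyRange_one 2 (n+1))
      (fun b => decide (a * b = n)) (n / a) ?_
    · simpa using this
    intro x hx
    have hx' : a * x = n := by simpa using hx
    rw [← hx', Int.mul_ediv_cancel_left x (by omega : a ≠ 0)]
  rw [hfil]
  have hiff : ((n / a) ∈ L ∧ a * (n / a) = n) ↔ (a ∣ n ∧ 2 ≤ n / a) := by
    constructor
    · rintro ⟨hmem, heq⟩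
      exact ⟨⟨n / a, heq.symm⟩, ((PySem.List.mem_pyRange_one).mp hmem).1⟩
    · rintro ⟨hdvd, hge⟩
      have heq : a * (n / a) = n := Int.mul_ediv_cancel' hdvd
      refine ⟨(PySem.List.mem_pyRange_one).mpr ⟨hge, ?_⟩, heq⟩
      nlinarith
  by_cases hc : a ∣ n ∧ 2 ≤ n / a
  · rw [if_pos (hiff.mpr hc), if_pos (by simpa using hc)]
    simp
  · rw [if_neg (fun h => hc (hiff.mp h)), if_neg (by simpa using hc)]
    simp

-- taking A's half of the divisor list is filtering it below the square root
lemma eppD_take_half (n : Int) (s : Nat)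
    (hs : s = if (eppD n).length % 2 = 0 then (eppD n).length / 2 else (eppD n).length / 2 + 1) :
    (eppD n).take s = (eppD n).filter (fun d => decide (d * d ≤ n)) := by
  have hpre := filter_eq_take_countP (eppD n) (fun d => decide (d * d ≤ n)) (eppD_pairwise n) ?_
  · have h2 := eppD_countP_sq n
    have h1 := eppD_countP_eq_le_one n
    have hcnt : (eppD n).countP (fun d => decide (d * d ≤ n)) = s := by
      rw [hs]; split_ifs with hpar <;> omega
    rw [hpre, hcnt]
  intro x hx y hy hxy hpy
  rcases mem_eppD.mp hx with ⟨⟨hx2, _⟩, _, _⟩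
  have hpy' : y * y ≤ n := by simpa using hpy
  simp only [decide_eq_true_eq]
  nlinarith

lemma eppB_nil_of_gt {n a : Int} (h2 : 2 ≤ a) (h : ¬ a * a ≤ n) : eppB n a = [] := by
  apply List.filter_eq_nil_iff.mpr
  intro d hd
  have hda : a ≤ d ∧ d < n + 1 := (PySem.List.mem_pyRange_one).mp hd
  simp only [Bool.and_eq_true, decide_eq_true_eq, not_and]
  intro _
  nlinarith

-- B's loop is the square-root filter of the remaining range
lemma eppAltLoop_eq (n : Int) (fuel : Nat) : ∀ (a : Int), 2 ≤ a → (n + 1 - a).toNat ≤ fuel →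
    ∀ acc, eppAltLoop n fuel a acc = acc ++ (eppB n a).map (fun d => [d, n / d]) := by
  induction fuel with
  | zero =>
    intro a h2 hf acc
    have : eppB n a = [] := by
      apply eppB_nil_of_gt h2
      intro hle
      have han : a ≤ n := by nlinarith
      omega
    simp [eppAltLoop, this]
  | succ fuel ih =>
    intro a h2 hf acc
    show (if a * a ≤ n then _ else _) = _
    by_cases hle : a * a ≤ n
    · rw [if_pos hle]
      have han : a ≤ n := by nlinarith
      rw [ih (a + 1) (by omega) (by omega)]
      have hcons : PySem.List.pyRange a (n + 1) 1 = a :: PySem.List.pyRange (a + 1) (n + 1) 1 :=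
        PySem.List.pyRange_one_cons (by omega)
      have hB : eppB n a = (if a ∣ n then [a] else []) ++ eppB n (a + 1) := by
        rw [eppB, hcons, List.filter_cons]
        by_cases hdvd : a ∣ n
        · simp [hdvd, hle, eppB]
        · simp [hdvd, eppB]
      rw [hB]
      by_cases hdvd : a ∣ n
      · rw [if_pos ((PySem.Int.mod_eq_zero_iff_dvd n a).mpr hdvd), if_pos hdvd,
          PySem.Int.floordiv_eq_ediv_of_pos (by omega : (0:Int) < a)]
        simp
      · rw [if_neg (fun h => hdvd ((PySem.Int.mod_eq_zero_iff_dvd n a).mp h)), if_neg hdvd]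
        simp
    · rw [if_neg hle, eppB_nil_of_gt h2 hle]
      simp

lemma eppD_filter_sq (n : Int) :
    (eppD n).filter (fun d => decide (d * d ≤ n)) = eppB n 2 := by
  rw [eppD, eppB, List.filter_filter]
  apply List.filter_congr
  intro d hd
  have hd2 : 2 ≤ d ∧ d < n + 1 := (PySem.List.mem_pyRange_one).mp hd
  by_cases hdvd : d ∣ n
  · by_cases hsq : d * d ≤ n
    · have heq : d * (n / d) = n := Int.mul_ediv_cancel' hdvd
      have : 2 ≤ n / d := by nlinarith
      simp [hdvd, hsq, this]
    · simp [hdvd, hsq]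
  · simp [hdvd]

theorem epp_main (n : Int) : equal_product_pairs n = equal_product_pairs_alt n := by
  have halt : equal_product_pairs_alt n = (eppB n 2).map (fun d => [d, n / d]) := by
    rw [equal_product_pairs_alt, eppAltLoop_eq n n.toNat 2 (by omega) (by omega) []]
    simp
  have hlen : ((eppD n).map (fun d => [d, n / d])).length = (eppD n).length := List.length_map _
  rw [equal_product_pairs]
  simp only [epp_intermediate n, hlen]
  set k := (eppD n).length with hk
  have hfd : PySem.Int.floordiv (k : Int) 2 = (k : Int) / 2 :=
    PySem.Int.floordiv_eq_ediv_of_pos (by norm_num)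
  by_cases hpar : k % 2 = 0
  · rw [if_pos hpar, hfd, PySem.List.slice_zero_start, PySem.List.slice_to _ (by positivity)]
    have hs : ((k : Int) / 2).toNat = k / 2 := by omega
    rw [hs, ← List.map_take, eppD_take_half n (k / 2) (by rw [← hk, if_pos hpar]),
      eppD_filter_sq, halt]
  · rw [if_neg hpar, hfd, PySem.List.slice_zero_start, PySem.List.slice_to _ (by positivity)]
    have hs : ((k : Int) / 2 + 1).toNat = k / 2 + 1 := by omega
    rw [hs, ← List.map_take, eppD_take_half n (k / 2 + 1) (by rw [← hk, if_neg hpar]),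
      eppD_filter_sq, halt]

-- ===== VERDICT (by name: the statement is the Claim_ definition above) =====
theorem equal_product_pairs_spec : Claim_equal_equal_product_pairs := by
  intro n _
  exact epp_main n
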